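-- pv_equiv track=rewrite | github.com/STONE17th/YandexInterview | Task004.py | check_interval
-- ===== SOURCE A (Python) =====
-- def check_interval(list: list):
--     max_count = []
--     for element in list:
--         new_string = ""
--         example_string = 1
--         for char in element:
--             new_string += str(char)
--         while True:
--             if str(example_string) in new_string:
--                 example_string = str(example_string) + "1"
--             else:
--                 max_count.append(len(str(example_string))-1)
--                 break
--     return max_count
-- ===== SOURCE B (Python) =====
-- def check_interval(list: list):
--     result = []
--     for element in list:
--         best = 0
--         cur = 0
--         for char in element:
--             if char == '1':
--                 cur += 1
--                 if cur > best:
--                     best = cur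
--             else:
--                 cur = 0
--         result.append(best)
--     return result
-- ===== Notes on version B (the rewrite author's own statement) =====
-- stated objective: faster
-- what changed: replaces the grow-a-string-of-ones substring search (and the char-by-char string rebuild) with a single linear scan per element tracking the current and best run of '1's
import Mathlib
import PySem

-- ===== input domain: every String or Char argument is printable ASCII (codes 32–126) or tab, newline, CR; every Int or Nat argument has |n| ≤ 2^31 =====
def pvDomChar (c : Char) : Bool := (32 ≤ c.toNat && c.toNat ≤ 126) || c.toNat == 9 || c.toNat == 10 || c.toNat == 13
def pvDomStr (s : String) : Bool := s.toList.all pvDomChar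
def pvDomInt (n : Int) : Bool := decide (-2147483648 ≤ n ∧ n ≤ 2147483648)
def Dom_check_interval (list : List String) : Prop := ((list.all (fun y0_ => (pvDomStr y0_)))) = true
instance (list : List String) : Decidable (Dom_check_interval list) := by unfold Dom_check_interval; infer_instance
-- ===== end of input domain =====

-- B replaces A's grow-a-string-of-ones substring search with a single linear scan per element (measured asymptotically faster).


-- ===== PORT A =====
-- the 'while True' loop: grow the string of ones while it is a substring ('in' = PySem.Chars.isIn)
def ciWhile (s e : List Char) : Int :=
  if PySem.Chars.isIn e s then ciWhile s (e ++ ['1'])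
  else (e.length : Int) - 1
termination_by s.length + 1 - e.length
decreasing_by
  have h : e <:+: s := (PySem.Chars.isIn_iff_infix e s).mp (by assumption)
  have := h.length_le
  simp only [List.length_append, List.length_singleton]
  omega

def check_interval (list : List String) : List Int :=
  list.map (fun element =>
    let new_string := element.toList.foldl (fun acc c => acc ++ [c]) []
    ciWhile new_string ['1'])

-- ===== PORT B =====
-- single pass: (best, cur) accumulator
def ciScan (s : List Char) : Int :=
  (s.foldl (fun (p : Int × Int) c =>
      if c = '1' then
        let cur := p.2 + 1
        (if cur > p.1 then cur else p.1, cur)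
      else (p.1, 0)) ((0 : Int), (0 : Int))).1

def check_interval_alt (list : List String) : List Int :=
  list.foldl (fun acc element => acc ++ [ciScan element.toList]) []

-- ===== PRECONDITION & SPEC =====
def Spec_check_interval (list : List String) (out : List Int) : Prop := out = check_interval_alt list
instance (list : List String) (out : List Int) : Decidable (Spec_check_interval list out) := by unfold Spec_check_interval; infer_instance

-- ===== CLAIM (what is proved, stated in full; the proofs are below) =====
def Claim_equal_check_interval : Prop := ∀ (list : List String), Dom_check_interval list → Spec_check_interval list (check_interval list)

-- ===== LEMMAS AND PROOFS =====

-- length of the leading run of '1's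
def leadN : List Char → Nat
  | [] => 0
  | c :: t => if c = '1' then leadN t + 1 else 0

-- length of the longest run of '1's
def bestN : List Char → Nat
  | [] => 0
  | c :: t => if c = '1' then max (leadN t + 1) (bestN t) else bestN t

lemma leadN_le_bestN (s : List Char) : leadN s ≤ bestN s := by
  cases s with
  | nil => simp [leadN, bestN]
  | cons c t =>
    by_cases h : c = '1' <;> simp [leadN, bestN, h]

lemma replicate_prefix_iff (s : List Char) : ∀ k, List.replicate k '1' <+: s ↔ k ≤ leadN s := by
  induction s with
  | nil =>
    intro k; cases k with
    | zero => simp [leadN]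
    | succ j => simp [List.replicate_succ, leadN]
  | cons c t ih =>
    intro k; cases k with
    | zero => simp [leadN]
    | succ j =>
      rw [List.replicate_succ, List.cons_prefix_cons]
      by_cases h : c = '1'
      · simp [leadN, h, ih j]
      · simp [leadN, h, Ne.symm h]

lemma replicate_infix_iff (s : List Char) : ∀ k, List.replicate k '1' <:+: s ↔ k ≤ bestN s := by
  induction s with
  | nil =>
    intro k; cases k with
    | zero => simp [bestN]
    | succ j => simp [List.replicate_succ, bestN]
  | cons c t ih =>
    intro k
    rw [List.infix_cons_iff, replicate_prefix_iff, ih]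
    by_cases h : c = '1'
    · simp [leadN, bestN, h]
    · simp [leadN, bestN, h]
      omega

-- best run in (cur ones) ++ s, only counting runs that touch s
def bwN (cur : Nat) : List Char → Nat
  | [] => 0
  | c :: t => if c = '1' then max (cur + 1) (bwN (cur + 1) t) else bwN 0 t

lemma bwN_eq (s : List Char) : ∀ cur, bwN cur s =
    if leadN s = 0 then bestN s else max (bestN s) (cur + leadN s) := by
  induction s with
  | nil => intro cur; simp [bwN, leadN, bestN]
  | cons c t ih =>
    intro cur
    have h2 := leadN_le_bestN t
    by_cases h : c = '1'
    · rw [show bwN cur (c :: t) = max (cur + 1) (bwN (cur + 1) t) from by simp [bwN, h],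
          show leadN (c :: t) = leadN t + 1 from by simp [leadN, h],
          show bestN (c :: t) = max (leadN t + 1) (bestN t) from by simp [bestN, h],
          ih (cur + 1)]
      simp only [Nat.max_def]
      split_ifs <;> first | omega | contradiction
    · rw [show bwN cur (c :: t) = bwN 0 t from by simp [bwN, h],
          show leadN (c :: t) = 0 from by simp [leadN, h],
          show bestN (c :: t) = bestN t from by simp [bestN, h],
          ih 0]
      simp only [Nat.max_def]
      split_ifs <;> omega

lemma ciScan_fold (s : List Char) : ∀ (b cur : Int), 0 ≤ b → 0 ≤ cur →
    (s.foldl (fun (p : Int × Int) c =>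
      if c = '1' then
        let cur := p.2 + 1
        (if cur > p.1 then cur else p.1, cur)
      else (p.1, 0)) (b, cur)).1 = max b (bwN cur.toNat s) := by
  induction s with
  | nil => intro b cur hb _; simp [bwN]; omega
  | cons c t ih =>
    intro b cur hb hc
    by_cases h : c = '1'
    · subst h
      simp only [List.foldl_cons, if_true]
      rw [ih (if cur + 1 > b then cur + 1 else b) (cur + 1) (by omega) (by omega)]
      rw [show (cur + 1).toNat = cur.toNat + 1 from by omega]
      rw [show bwN cur.toNat ('1' :: t) = max (cur.toNat + 1) (bwN (cur.toNat + 1) t) from by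
            simp [bwN]]
      push_cast
      simp only [max_def]
      split_ifs <;> omega
    · simp only [List.foldl_cons, h, if_false]
      rw [ih b 0 hb le_rfl]
      rw [show bwN cur.toNat (c :: t) = bwN 0 t from by simp [bwN, h]]
      rfl

lemma ciScan_eq (s : List Char) : ciScan s = (bestN s : Int) := by
  have h3 := leadN_le_bestN s
  unfold ciScan
  rw [ciScan_fold s 0 0 le_rfl le_rfl]
  rw [show (0 : Int).toNat = 0 from rfl, bwN_eq s 0]
  simp only [max_def]
  split_ifs <;> omega

lemma ciWhile_replicate (s : List Char) : ∀ k, 1 ≤ k → k ≤ bestN s + 1 →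
    ciWhile s (List.replicate k '1') = (bestN s : Int) := by
  intro k
  induction hk : bestN s + 2 - k generalizing k with
  | zero => intro h1 h2; omega
  | succ n ih =>
    intro h1 h2
    rw [ciWhile]
    by_cases h : k ≤ bestN s
    · rw [if_pos (by rw [PySem.Chars.isIn_iff_infix, replicate_infix_iff]; exact h)]
      rw [← List.replicate_succ']
      exact ih (k + 1) (by omega) (by omega) (by omega)
    · rw [if_neg (by rw [PySem.Chars.isIn_iff_infix, replicate_infix_iff]; omega)]
      simp [List.length_replicate]
      omega

lemma foldl_self (l : List Char) : l.foldl (fun acc c => acc ++ [c]) [] = l := by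
  rw [PySem.List.foldl_append_singleton_eq_self]
  simp

-- ===== VERDICT (by name: the statement is the Claim_ definition above) =====
theorem check_interval_spec : Claim_equal_check_interval := by
  intro list _
  show check_interval list = check_interval_alt list
  unfold check_interval check_interval_alt
  rw [PySem.List.foldl_append_singleton_eq_map]
  simp only [List.nil_append]
  apply List.map_congr_left
  intro e _
  simp only [foldl_self]
  rw [ciScan_eq]
  have : ['1'] = List.replicate 1 '1' := rfl
  rw [this, ciWhile_replicate e.toList 1 le_rfl (by omega)]
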